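-- pv_equiv track=rewrite | github.com/siiiu7/LRall | LR-6 24 вариант 2 часть.py | get_combinations
-- ===== SOURCE A (Python) =====
-- def get_combinations(fruits, size, combination, start):
--     if size == 0:
--         yield combination
--         return
--     for index in range(start, len(fruits)):
--         fruit = list(fruits.keys())[index]
--         new_combination = combination + [fruit]
--         yield from get_combinations(fruits, size-1, new_combination, index+1)
-- ===== SOURCE B (Python) =====
-- def get_combinations(fruits, size, combination, start):
--     keys = list(fruits.keys())[start:]
--     yield from _combos(keys, size, combination)
--
--
-- def _combos(keys, size, prefix):
--     if size == 0:
--         yield prefix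
--         return
--     if size < 0 or size > len(keys):
--         return
--     head, rest = keys[0], keys[1:]
--     yield from _combos(rest, size - 1, prefix + [head])
--     yield from _combos(rest, size, prefix)
-- ===== Notes on version B (the rewrite author's own statement) =====
-- stated objective: alternative
-- what changed: B slices the key list once and enumerates combinations by a binary take/skip structural recursion on the list (with an infeasibility prune), instead of A's recursion that loops an index over range(start, len(fruits)) and re-materializes list(fruits.keys()) at every iteration.
-- outside the precondition, e.g. on get_combinations({'a': 1, 'b': 2}, 2, [], -1): A returns [['b', 'a'], ['b', 'b'], ['a', 'b']], B returns []
import Mathlib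
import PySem

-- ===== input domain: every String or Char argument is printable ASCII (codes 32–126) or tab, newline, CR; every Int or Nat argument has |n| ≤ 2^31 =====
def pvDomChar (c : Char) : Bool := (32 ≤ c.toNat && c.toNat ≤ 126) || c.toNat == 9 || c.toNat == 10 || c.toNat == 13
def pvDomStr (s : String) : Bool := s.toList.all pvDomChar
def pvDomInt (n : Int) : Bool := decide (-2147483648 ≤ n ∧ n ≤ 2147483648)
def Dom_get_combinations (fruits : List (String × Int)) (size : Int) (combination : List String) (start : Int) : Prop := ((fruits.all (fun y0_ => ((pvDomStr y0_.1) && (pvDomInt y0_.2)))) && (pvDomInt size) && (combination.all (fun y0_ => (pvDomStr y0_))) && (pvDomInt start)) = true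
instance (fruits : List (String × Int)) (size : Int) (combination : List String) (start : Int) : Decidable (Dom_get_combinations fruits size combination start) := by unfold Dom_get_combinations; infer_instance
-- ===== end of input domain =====

-- B replaces A's index-range recursion (which re-materializes list(fruits.keys()) at every
-- iteration) by one slice of the key list followed by a binary take/skip structural recursion
-- with an infeasibility prune: a different decomposition of the same enumeration, same order.
-- Both A and B are Python generators; the proved equality is about the yielded sequence as a list.

-- list(fruits.keys()) for the dict given as an association list: first occurrences, in order
def pvKeys (fruits : List (String × Int)) : List String :=
  PySem.List.dedup (fruits.map Prod.fst)

-- ===== PORT A =====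
-- fuel is a totality guard only: the wrapper passes (len - start).toNat + 1, which the proofs
-- show is never exhausted on 0 ≤ start (and on size = 0 fuel is not consumed at all).
def gcA (fruits : List (String × Int)) (fuel : Nat) (size : Int) (comb : List String) (start : Int) : List (List String) :=
  if size = 0 then [comb]
  else
    match fuel with
    | 0 => []
    | f + 1 =>
      (PySem.List.pyRange start ((pvKeys fruits).length : Int) 1).foldl
        (fun acc index =>
          let fruit := PySem.List.pyGetD (pvKeys fruits) index ""
          let new_combination := comb ++ [fruit]
          acc ++ gcA fruits f (size - 1) new_combination (index + 1)) []

def get_combinations (fruits : List (String × Int)) (size : Int) (combination : List String) (start : Int) : List (List String) :=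
  gcA fruits ((((pvKeys fruits).length : Int) - start).toNat + 1) size combination start

-- ===== PORT B =====
def gcB (keys : List String) (size : Int) (pre : List String) : List (List String) :=
  if size = 0 then [pre]
  else if size < 0 ∨ (keys.length : Int) < size then []
  else
    match keys with
    | [] => []   -- unreachable: 0 < size ≤ keys.length here
    | h :: t => gcB t (size - 1) (pre ++ [h]) ++ gcB t size pre
termination_by keys.length

def get_combinations_alt (fruits : List (String × Int)) (size : Int) (combination : List String) (start : Int) : List (List String) :=
  gcB (PySem.List.slice (pvKeys fruits) (some start) none) size combination

-- ===== PRECONDITION & SPEC =====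
-- Pre_ excludes negative start with nonzero size: start is an internal recursion cursor
-- (callers pass 0), and there A either raises IndexError (start < -len) or enumerates via
-- Python's negative-index wraparound, an accident outside the function's natural domain.
def Pre_get_combinations (fruits : List (String × Int)) (size : Int) (combination : List String) (start : Int) : Prop := 0 ≤ start ∨ size = 0
instance (fruits : List (String × Int)) (size : Int) (combination : List String) (start : Int) : Decidable (Pre_get_combinations fruits size combination start) := by unfold Pre_get_combinations; infer_instance

def pvWitness_get_combinations : (List (String × Int)) × Int × List String × Int := ([("apple", 1), ("banana", 2), ("cherry", 3)], 2, [], 0)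

def Spec_get_combinations (fruits : List (String × Int)) (size : Int) (combination : List String) (start : Int) (out : List (List String)) : Prop := out = get_combinations_alt fruits size combination start
instance (fruits : List (String × Int)) (size : Int) (combination : List String) (start : Int) (out : List (List String)) : Decidable (Spec_get_combinations fruits size combination start out) := by unfold Spec_get_combinations; infer_instance

-- ===== CLAIM (what is proved, stated in full; the proofs are below) =====
def Claim_equal_get_combinations : Prop := ∀ (fruits : List (String × Int)) (size : Int) (combination : List String) (start : Int), Dom_get_combinations fruits size combination start → Pre_get_combinations fruits size combination start → Spec_get_combinations fruits size combination start (get_combinations fruits size combination start)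

-- ===== LEMMAS AND PROOFS =====

-- A yields nothing when the remaining index range cannot host `size` picks (or size < 0):
-- every branch of its recursion dies without reaching size = 0.
lemma gcA_empty (fruits : List (String × Int)) :
    ∀ (fuel : Nat) (size : Int) (comb : List String) (start : Int),
      size ≠ 0 →
      (size < 0 ∨ ((pvKeys fruits).length : Int) - start < size) →
      gcA fruits fuel size comb start = [] := by
  intro fuel
  induction fuel with
  | zero => intro size comb start hne _; rw [gcA, if_neg hne]
  | succ f ih =>
    intro size comb start hne hcond
    rw [gcA, if_neg hne]
    rw [PySem.List.foldl_append_eq_flatMap]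
    rw [List.nil_append, List.flatMap_eq_nil_iff]
    intro idx hidx
    obtain ⟨h1, h2⟩ := (PySem.List.mem_pyRange_one).mp hidx
    apply ih
    · rcases hcond with h | h <;> omega
    · rcases hcond with h | h
      · left; omega
      · right; omega

-- The heart of the equivalence: A's recursion from cursor `start` computes exactly B's
-- take/skip recursion on the dropped key list, by induction on the remaining length.
lemma gcA_eq_gcB (fruits : List (String × Int)) :
    ∀ (k : Nat) (fuel : Nat) (size : Int) (comb : List String) (start : Int),
      0 ≤ start →
      (((pvKeys fruits).length : Int) - start).toNat = k →
      k + 1 ≤ fuel →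
      gcA fruits fuel size comb start = gcB ((pvKeys fruits).drop start.toNat) size comb := by
  intro k
  induction k with
  | zero =>
    intro fuel size comb start hs hk hf
    have hlen : ((pvKeys fruits).length : Int) ≤ start := by omega
    have hdrop : (pvKeys fruits).drop start.toNat = [] := by
      apply List.drop_eq_nil_of_le; omega
    rw [hdrop]
    by_cases hz : size = 0
    · subst hz; rw [gcA.eq_def, if_pos rfl, gcB.eq_def, if_pos rfl]
    · obtain ⟨f, rfl⟩ : ∃ f, fuel = f + 1 := ⟨fuel - 1, by omega⟩
      rw [gcA, if_neg hz, PySem.List.pyRange_one_eq_nil (by omega), List.foldl_nil]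
      rw [gcB.eq_def, if_neg hz]
      have hc : size < 0 ∨ ((([] : List String).length : Int) < size) := by
        simp only [List.length_nil]; omega
      rw [if_pos hc]
  | succ k ih =>
    intro fuel size comb start hs hk hf
    have hlt : start < ((pvKeys fruits).length : Int) := by omega
    have hltn : start.toNat < (pvKeys fruits).length := by omega
    have hdrop : (pvKeys fruits).drop start.toNat
        = (pvKeys fruits)[start.toNat] :: (pvKeys fruits).drop (start.toNat + 1) :=
      List.drop_eq_getElem_cons hltn
    by_cases hz : size = 0
    · subst hz; rw [gcA.eq_def, if_pos rfl, gcB.eq_def, if_pos rfl]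
    · obtain ⟨f, rfl⟩ : ∃ f, fuel = f + 1 := ⟨fuel - 1, by omega⟩
      by_cases hcond : size < 0 ∨ ((((pvKeys fruits).drop start.toNat).length : Int) < size)
      · -- infeasible: B prunes, A's recursion dies
        have hA : gcA fruits (f + 1) size comb start = [] := by
          apply gcA_empty _ _ _ _ _ hz
          rcases hcond with h | h
          · exact Or.inl h
          · right; rw [List.length_drop] at h; omega
        rw [hA, gcB.eq_def, if_neg hz, if_pos hcond]
      · -- feasible: both take head + skip head
        rw [gcA, if_neg hz]
        rw [PySem.List.pyRange_one_cons hlt]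
        rw [PySem.List.foldl_append_eq_flatMap]
        rw [List.nil_append, List.flatMap_cons]
        have hget : PySem.List.pyGetD (pvKeys fruits) start "" = (pvKeys fruits)[start.toNat] := by
          conv_lhs => rw [show start = ((start.toNat : Nat) : Int) from by omega]
          rw [PySem.List.pyGetD_natCast]
          rw [List.getD_eq_getElem?_getD, List.getElem?_eq_getElem hltn]
          rfl
        have hhead :
            gcA fruits f (size - 1) (comb ++ [PySem.List.pyGetD (pvKeys fruits) start ""]) (start + 1)
              = gcB ((pvKeys fruits).drop (start.toNat + 1)) (size - 1)
                  (comb ++ [(pvKeys fruits)[start.toNat]]) := by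
          rw [hget]
          have h := ih f (size - 1) (comb ++ [(pvKeys fruits)[start.toNat]]) (start + 1)
            (by omega) (by omega) (by omega)
          rw [show ((start : Int) + 1).toNat = start.toNat + 1 from by omega] at h
          rw [h]
        have htail :
            (PySem.List.pyRange (start + 1) ((pvKeys fruits).length : Int) 1).flatMap
              (fun index =>
                gcA fruits f (size - 1) (comb ++ [PySem.List.pyGetD (pvKeys fruits) index ""]) (index + 1))
              = gcB ((pvKeys fruits).drop (start.toNat + 1)) size comb := by
          have hA : gcA fruits (f + 1) size comb (start + 1)
              = (PySem.List.pyRange (start + 1) ((pvKeys fruits).length : Int) 1).flatMap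
                  (fun index =>
                    gcA fruits f (size - 1) (comb ++ [PySem.List.pyGetD (pvKeys fruits) index ""]) (index + 1)) := by
            rw [gcA, if_neg hz, PySem.List.foldl_append_eq_flatMap, List.nil_append]
          rw [← hA]
          have h := ih (f + 1) size comb (start + 1) (by omega) (by omega) (by omega)
          rw [show ((start : Int) + 1).toNat = start.toNat + 1 from by omega] at h
          rw [h]
        rw [hhead, htail]
        conv_rhs => rw [gcB.eq_def]
        rw [if_neg hz, if_neg hcond, hdrop]

-- ===== VERDICT (by name: the statement is the Claim_ definition above) =====
theorem get_combinations_spec : Claim_equal_get_combinations := by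
  intro fruits size combination start _ hpre
  unfold Spec_get_combinations get_combinations get_combinations_alt
  by_cases hz : size = 0
  · subst hz; rw [gcA.eq_def, if_pos rfl, gcB.eq_def, if_pos rfl]
  · have hs : 0 ≤ start := by
      rcases hpre with h | h
      · exact h
      · exact absurd h hz
    rw [PySem.List.slice_from _ hs]
    exact gcA_eq_gcB fruits ((((pvKeys fruits).length : Int) - start).toNat)
      _ size combination start hs rfl (by omega)
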